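-- pv_equiv track=rewrite | github.com/alimaazakhter/ProjectMind-AI | generator.py | _match_canonical
-- ===== SOURCE A (Python) =====
-- SECTION_KEYS = [
--     "Project Title",
--     "Abstract",
--     "Problem Statement",
--     "Literature Review",
--     "Methodology",
--     "Algorithms Used",
--     "Why This Project Is Useful",
--     "Real-World Applications",
--     "Technology Stack",
--     "Dataset Suggestions",
--     "System Architecture",
--     "Step-by-Step Implementation",
--     "Folder Structure",
--     "Future Enhancements",
--     "Resume Description",
--     "References",
-- ]
--
-- def _match_canonical(header: str) -> str:
--     """Best-effort match of a parsed header to our canonical SECTION_KEYS."""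
--     header_lower = header.lower()
--     for key in SECTION_KEYS:
--         if key.lower() in header_lower or header_lower in key.lower():
--             return key
--     # Close-enough match by first significant word
--     for key in SECTION_KEYS:
--         key_words = set(key.lower().split())
--         header_words = set(header_lower.split())
--         if len(key_words & header_words) >= 2:
--             return key
--     return header  # give up — use as-is
-- ===== SOURCE B (Python) =====
-- SECTION_KEYS = [
--     "Project Title",
--     "Abstract",
--     "Problem Statement",
--     "Literature Review",
--     "Methodology",
--     "Algorithms Used",
--     "Why This Project Is Useful",
--     "Real-World Applications",
--     "Technology Stack",
--     "Dataset Suggestions",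
--     "System Architecture",
--     "Step-by-Step Implementation",
--     "Folder Structure",
--     "Future Enhancements",
--     "Resume Description",
--     "References",
-- ]
--
-- def _match_canonical(header: str) -> str:
--     """Single pass over SECTION_KEYS: substring matches win outright; the first
--     word-overlap (>= 2 common words) key is remembered as a fallback only."""
--     header_lower = header.lower()
--     header_words = set(header_lower.split())
--     fallback = None
--     for key in SECTION_KEYS:
--         key_lower = key.lower()
--         if key_lower in header_lower or header_lower in key_lower:
--             return key
--         if fallback is None and len(set(key_lower.split()) & header_words) >= 2:
--             fallback = key
--     return fallback if fallback is not None else header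
-- ===== Notes on version B (the rewrite author's own statement) =====
-- stated objective: simpler
-- what changed: Replaces A's two sequential scans of SECTION_KEYS with one pass that returns immediately on a substring match and remembers the first word-overlap key as a fallback returned only after the full scan; header_words is computed once instead of being rebuilt per key, which is the constant-factor speedup.
import Mathlib
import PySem

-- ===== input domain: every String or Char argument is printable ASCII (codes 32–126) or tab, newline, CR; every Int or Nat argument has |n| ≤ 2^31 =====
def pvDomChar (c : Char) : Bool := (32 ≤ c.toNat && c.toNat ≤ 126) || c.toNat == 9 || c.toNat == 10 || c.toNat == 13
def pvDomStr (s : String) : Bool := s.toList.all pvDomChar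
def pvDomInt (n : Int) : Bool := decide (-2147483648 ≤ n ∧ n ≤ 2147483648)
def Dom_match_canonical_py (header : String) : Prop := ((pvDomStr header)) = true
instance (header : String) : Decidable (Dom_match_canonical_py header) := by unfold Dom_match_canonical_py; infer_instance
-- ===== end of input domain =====

-- B merges A's two scans of SECTION_KEYS into one pass: substring matches return
-- immediately, the first word-overlap key is only remembered as a fallback (simpler).

-- shared constant and the two tests both Pythons perform
def sectionKeys : List String := [
  "Project Title", "Abstract", "Problem Statement", "Literature Review",
  "Methodology", "Algorithms Used", "Why This Project Is Useful",
  "Real-World Applications", "Technology Stack", "Dataset Suggestions",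
  "System Architecture", "Step-by-Step Implementation", "Folder Structure",
  "Future Enhancements", "Resume Description", "References"]

-- key.lower() in header_lower or header_lower in key.lower()
def subTest (headerLower key : String) : Bool :=
  PySem.Str.isIn (PySem.Str.lower key) headerLower ||
  PySem.Str.isIn headerLower (PySem.Str.lower key)

-- len(set(key.lower().split()) & header_words) >= 2
def overlapTest (headerWords : PySem.Set String) (key : String) : Bool :=
  2 ≤ PySem.Set.len (PySem.Set.inter
        (PySem.Set.ofList (PySem.Str.split₀ (PySem.Str.lower key))) headerWords)

-- ===== PORT A =====
def match_canonical_py (header : String) : String :=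
  let headerLower := PySem.Str.lower header
  match sectionKeys.find? (fun key => subTest headerLower key) with
  | some key => key
  | none =>
    -- second loop: header_words is rebuilt from header_lower each iteration (same value)
    match sectionKeys.find? (fun key =>
        overlapTest (PySem.Set.ofList (PySem.Str.split₀ headerLower)) key) with
    | some key => key
    | none => header

-- ===== PORT B =====
def altLoop (headerLower : String) (headerWords : PySem.Set String) (header : String) :
    List String → Option String → String
  | [], fallback => fallback.getD header
  | key :: keys, fallback =>
    if subTest headerLower key then key
    else altLoop headerLower headerWords header keys
      (if fallback.isNone && overlapTest headerWords key then some key else fallback)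

def match_canonical_py_alt (header : String) : String :=
  let headerLower := PySem.Str.lower header
  let headerWords := PySem.Set.ofList (PySem.Str.split₀ headerLower)
  altLoop headerLower headerWords header sectionKeys none

-- ===== PRECONDITION & SPEC =====
def Spec_match_canonical_py (header : String) (out : String) : Prop := out = match_canonical_py_alt header
instance (header : String) (out : String) : Decidable (Spec_match_canonical_py header out) := by unfold Spec_match_canonical_py; infer_instance

-- ===== CLAIM (what is proved, stated in full; the proofs are below) =====
def Claim_equal_match_canonical_py : Prop := ∀ (header : String), Dom_match_canonical_py header → Spec_match_canonical_py header (match_canonical_py header)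

-- ===== LEMMAS AND PROOFS =====

-- The one-pass loop equals: first substring match, else the recorded fallback,
-- else the first overlap match, else the header.
theorem altLoop_eq (hl : String) (hw : PySem.Set String) (header : String)
    (keys : List String) (fb : Option String) :
    altLoop hl hw header keys fb =
      match keys.find? (fun k => subTest hl k) with
      | some k => k
      | none =>
        match fb with
        | some f => f
        | none =>
          match keys.find? (fun k => overlapTest hw k) with
          | some k => k
          | none => header := by
  induction keys generalizing fb with
  | nil => cases fb <;> simp [altLoop]
  | cons k ks ih =>
    by_cases hs : subTest hl k
    · simp [altLoop, hs, List.find?]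
    · cases fb with
      | some f => simp [altLoop, hs, List.find?, ih]
      | none =>
        by_cases ho : overlapTest hw k <;>
          simp [altLoop, hs, ho, List.find?, ih]

-- ===== VERDICT (by name: the statement is the Claim_ definition above) =====
theorem match_canonical_py_spec : Claim_equal_match_canonical_py := by
  intro header _
  unfold Spec_match_canonical_py match_canonical_py match_canonical_py_alt
  rw [altLoop_eq]
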